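-- pv_equiv track=rewrite | github.com/NicolaeNMV/Tsunami | orbited/lib/morbid/tests/test_messagequeue.py | queue_rights
-- ===== SOURCE A (Python) =====
-- def queue_rights(group_list, qname):
--     #Simple access rights test.
--     #Admin group automatically has all rights - no need to check anything else
--     #A group has the access specified by the name of the queue
--     #/queue/group1/c/r/w/ - Group 1 has all rights
--     #/queue/group2/r/ - Group 2 has read-only access
--     r = set()
--     for g in group_list:
--         if g == 'admin':
--             r = set(['c','r','w'])
--             break
--         if g not in qname:
--             continue
--         for type in ['/c/', '/r/', '/w/']:
--             if type in qname:
--                 r.add(type[1])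
--     return r
-- ===== SOURCE B (Python) =====
-- def queue_rights(group_list, qname):
--     # Different algorithm: instead of testing the three substrings '/c/','/r/','/w/'
--     # separately, do ONE character-level sliding-window scan of qname maintaining
--     # three boolean flags, gated by an admin test and a group-match existence test.
--     if 'admin' in group_list:
--         return {'c', 'r', 'w'}
--     if not any(g in qname for g in group_list):
--         return set()
--     c = r = w = False
--     for i in range(len(qname) - 2):
--         if qname[i] == '/' and qname[i + 2] == '/':
--             m = qname[i + 1]
--             if m == 'c':
--                 c = True
--             elif m == 'r':
--                 r = True
--             elif m == 'w':
--                 w = True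
--     out = set()
--     if c:
--         out.add('c')
--     if r:
--         out.add('r')
--     if w:
--         out.add('w')
--     return out
-- ===== Notes on version B (the rewrite author's own statement) =====
-- stated objective: faster
-- what changed: Replaces the per-group loop with nested per-token substring searches by an admin membership test, a short-circuiting any() group-match check, and a single character-level sliding-window scan of qname setting three boolean flags, so qname is scanned once instead of being re-searched for every matching group.
import Mathlib
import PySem

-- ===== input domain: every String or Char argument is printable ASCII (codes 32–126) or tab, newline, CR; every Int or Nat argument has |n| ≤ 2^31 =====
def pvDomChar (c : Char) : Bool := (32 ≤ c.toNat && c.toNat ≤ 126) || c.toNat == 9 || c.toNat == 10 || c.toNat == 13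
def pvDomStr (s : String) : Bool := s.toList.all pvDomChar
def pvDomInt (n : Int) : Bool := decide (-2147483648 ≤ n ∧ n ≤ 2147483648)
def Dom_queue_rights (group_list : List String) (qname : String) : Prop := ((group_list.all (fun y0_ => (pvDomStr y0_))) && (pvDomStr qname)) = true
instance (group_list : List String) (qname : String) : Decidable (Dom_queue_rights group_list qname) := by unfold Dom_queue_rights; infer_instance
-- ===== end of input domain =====

-- B replaces the nested per-group/per-token substring loops by an admin test, a short-circuiting
-- any() group-match check, and one sliding-window scan of qname with three boolean flags
-- (a timing run measured B faster); equal return values proved on all of Dom.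

-- ===== PORT A =====
-- t[1] for the literal three-char tokens; Python indexing a str yields a str (exact here: index 1 in range)
def pvCharAt1 (t : String) : String :=
  match PySem.Str.pyGet? t 1 with
  | some c => String.ofList [c]
  | none => ""

-- inner 'for type in ['/c/','/r/','/w/']: if type in qname: r.add(type[1])'
def pvInnerA (qname : String) (r : PySem.Set String) : PySem.Set String :=
  ["/c/", "/r/", "/w/"].foldl
    (fun r t => if PySem.Str.isIn t qname then PySem.Set.add r (pvCharAt1 t) else r) r

-- the 'for g in group_list' loop with accumulator r (break on 'admin' returns immediately)
def pvGoA (qname : String) : List String → PySem.Set String → PySem.Set String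
  | [], r => r
  | g :: gs, r =>
    if g == "admin" then PySem.Set.ofList ["c", "r", "w"]
    else if !(PySem.Str.isIn g qname) then pvGoA qname gs r
    else pvGoA qname gs (pvInnerA qname r)

def queue_rights (group_list : List String) (qname : String) : List String :=
  pvGoA qname group_list PySem.Set.empty

-- ===== PORT B =====
-- 'for i in range(len(qname)-2): if qname[i]=='/' and qname[i+2]=='/': …' — the left-to-right
-- sliding window over the characters, carrying the three flags c, r, w (exact: same windows, same order)
def pvScanB : List Char → Bool → Bool → Bool → Bool × Bool × Bool
  | a :: b :: c :: rest, fc, fr, fw =>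
    if a = '/' ∧ c = '/' then
      if b = 'c' then pvScanB (b :: c :: rest) true fr fw
      else if b = 'r' then pvScanB (b :: c :: rest) fc true fw
      else if b = 'w' then pvScanB (b :: c :: rest) fc fr true
      else pvScanB (b :: c :: rest) fc fr fw
    else pvScanB (b :: c :: rest) fc fr fw
  | _, fc, fr, fw => (fc, fr, fw)

-- 'out = set(); if c: out.add('c'); …' — the set is built in the fixed order c, r, w
def pvFlagsToSet (fc fr fw : Bool) : PySem.Set String :=
  (if fc then PySem.Set.add PySem.Set.empty "c" else PySem.Set.empty) |>
    (fun s => if fr then PySem.Set.add s "r" else s) |>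
    (fun s => if fw then PySem.Set.add s "w" else s)

def queue_rights_alt (group_list : List String) (qname : String) : List String :=
  if group_list.contains "admin" then PySem.Set.ofList ["c", "r", "w"]
  else if !(group_list.any (fun g => PySem.Str.isIn g qname)) then PySem.Set.empty
  else
    let f := pvScanB qname.toList false false false
    pvFlagsToSet f.1 f.2.1 f.2.2

-- ===== PRECONDITION & SPEC =====
def Spec_queue_rights (group_list : List String) (qname : String) (out : List String) : Prop := out = queue_rights_alt group_list qname
instance (group_list : List String) (qname : String) (out : List String) : Decidable (Spec_queue_rights group_list qname out) := by unfold Spec_queue_rights; infer_instance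

-- ===== CLAIM =====
def Claim_equal_queue_rights : Prop := ∀ (group_list : List String) (qname : String), Dom_queue_rights group_list qname → Spec_queue_rights group_list qname (queue_rights group_list qname)

-- ===== LEMMAS AND PROOFS =====

-- the rights set determined by qname alone, as A's inner loop produces it from ∅
def pvRights (qname : String) : PySem.Set String := pvInnerA qname PySem.Set.empty

-- the inner loop maps both the empty set and the rights set to the rights set
lemma pvInnerA_eq (qname : String) (r : PySem.Set String)
    (h : r = PySem.Set.empty ∨ r = pvRights qname) : pvInnerA qname r = pvRights qname := by
  rcases h with h | h <;> subst h <;>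
  cases hb1 : PySem.Chars.isIn "/c/".toList qname.toList <;>
  cases hb2 : PySem.Chars.isIn "/r/".toList qname.toList <;>
  cases hb3 : PySem.Chars.isIn "/w/".toList qname.toList <;>
  simp_all [pvInnerA, pvRights, pvCharAt1]

lemma pvGoA_eq (qname : String) : ∀ (gs : List String) (r : PySem.Set String),
    (r = PySem.Set.empty ∨ r = pvRights qname) →
    pvGoA qname gs r =
      if gs.contains "admin" then PySem.Set.ofList ["c", "r", "w"]
      else if gs.any (fun g => PySem.Str.isIn g qname) then pvRights qname
      else r := by
  intro gs
  induction gs with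
  | nil => intro r _; simp [pvGoA]
  | cons g gs ih =>
    intro r h
    by_cases hadm : g = "admin"
    · subst hadm; simp [pvGoA]
    · have hadm' : ¬ ("admin" = g) := fun h' => hadm h'.symm
      cases hin : PySem.Chars.isIn g.toList qname.toList with
      | false =>
        rw [pvGoA]
        simp only [beq_iff_eq, hadm, if_false]
        rw [if_pos (by simp [hin]), ih r h]
        simp [hadm', hin]
      | true =>
        rw [pvGoA]
        simp only [beq_iff_eq, hadm, if_false]
        rw [if_neg (by simp [hin]), ih _ (Or.inr (pvInnerA_eq qname r h))]
        by_cases hmem : "admin" ∈ gs <;> simp [hadm', hin, hmem]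
        exact fun _ => pvInnerA_eq qname r h

-- characterisation of the scan: each flag records whether its three-char pattern is an infix
lemma pvScanB_eq : ∀ (l : List Char) (fc fr fw : Bool),
    pvScanB l fc fr fw =
      (fc || decide (['/', 'c', '/'] <:+: l),
       fr || decide (['/', 'r', '/'] <:+: l),
       fw || decide (['/', 'w', '/'] <:+: l)) := by
  intro l
  induction l with
  | nil => intro fc fr fw; simp [pvScanB]
  | cons a tl ih =>
    intro fc fr fw
    match tl, ih with
    | [], _ => simp [pvScanB, List.infix_cons_iff]
    | [b], _ =>
      have h3 : ∀ x : Char, ¬ (['/', x, '/'] <:+: [a, b]) := by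
        intro x hx; have := hx.length_le; simp at this
      simp [pvScanB, h3]
    | b :: c :: rest, ih =>
      have key : ∀ x : Char,
          (decide (['/', x, '/'] <:+: a :: b :: c :: rest) : Bool) =
            (decide (a = '/' ∧ b = x ∧ c = '/') || decide (['/', x, '/'] <:+: b :: c :: rest)) := by
        intro x
        rw [← Bool.decide_or]
        rw [decide_eq_decide]
        rw [List.infix_cons_iff]
        constructor
        · rintro (hp | hi)
          · left
            rcases hp with ⟨t, ht⟩
            injection ht with h1 ht; injection ht with h2 ht; injection ht with h3 _
            exact ⟨h1.symm, h2.symm, h3.symm⟩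
          · right; exact hi
        · rintro (⟨h1, h2, h3⟩ | hi)
          · left; subst h1 h2 h3; exact ⟨rest, rfl⟩
          · right; exact hi
      have ne1 : ¬ (('r':Char) = 'c') := by decide
      have ne2 : ¬ (('w':Char) = 'c') := by decide
      have ne3 : ¬ (('c':Char) = 'r') := by decide
      have ne4 : ¬ (('w':Char) = 'r') := by decide
      have ne5 : ¬ (('c':Char) = 'w') := by decide
      have ne6 : ¬ (('r':Char) = 'w') := by decide
      rw [pvScanB]
      by_cases hac : a = '/' ∧ c = '/'
      · obtain ⟨ha, hc⟩ := hac
        subst ha hc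
        rw [if_pos ⟨rfl, rfl⟩]
        by_cases hbc : b = 'c'
        · subst hbc
          rw [if_pos rfl, ih, key 'c', key 'r', key 'w']
          simp [ne3, ne5]
        · rw [if_neg hbc]
          by_cases hbr : b = 'r'
          · subst hbr
            rw [if_pos rfl, ih, key 'c', key 'r', key 'w']
            simp [ne1, ne6]
          · rw [if_neg hbr]
            by_cases hbw : b = 'w'
            · subst hbw
              rw [if_pos rfl, ih, key 'c', key 'r', key 'w']
              simp [ne2, ne4]
            · rw [if_neg hbw, ih, key 'c', key 'r', key 'w']
              simp [hbc, hbr, hbw]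
      · rw [if_neg hac, ih, key 'c', key 'r', key 'w']
        have hd : ∀ x : Char, decide (a = '/' ∧ b = x ∧ c = '/') = false := by
          intro x; simp only [decide_eq_false_iff_not]
          rintro ⟨h1, _, h3⟩; exact hac ⟨h1, h3⟩
        rw [hd 'c', hd 'r', hd 'w']; simp

-- Chars.isIn as the decide of the infix relation
lemma chars_isIn_decide (sub s : List Char) :
    PySem.Chars.isIn sub s = decide (sub <:+: s) := by
  cases h : (decide (sub <:+: s) : Bool)
  · exact (PySem.Chars.isIn_eq_false_iff sub s).mpr (of_decide_eq_false h)
  · exact (PySem.Chars.isIn_iff_infix sub s).mpr (of_decide_eq_true h)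

-- A's rights set (as built by the inner loop) equals B's flag-built set
lemma rights_eq_scan (qname : String) :
    pvRights qname =
      pvFlagsToSet (pvScanB qname.toList false false false).1
        (pvScanB qname.toList false false false).2.1
        (pvScanB qname.toList false false false).2.2 := by
  rw [pvScanB_eq]
  cases h1 : (decide (['/', 'c', '/'] <:+: qname.toList) : Bool) <;>
  cases h2 : (decide (['/', 'r', '/'] <:+: qname.toList) : Bool) <;>
  cases h3 : (decide (['/', 'w', '/'] <:+: qname.toList) : Bool) <;>
  · simp only [decide_eq_false_iff_not, decide_eq_true_eq] at h1 h2 h3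
    simp [pvRights, pvInnerA, pvFlagsToSet, PySem.Str.isIn, pvCharAt1,
      chars_isIn_decide, h1, h2, h3]

-- ===== VERDICT =====
theorem queue_rights_spec : Claim_equal_queue_rights := by
  intro group_list qname _
  unfold Spec_queue_rights queue_rights queue_rights_alt
  rw [pvGoA_eq qname group_list PySem.Set.empty (Or.inl rfl)]
  cases hadm : group_list.contains "admin" with
  | true => simp only [hadm, if_true]
  | false =>
    cases hany : group_list.any (fun g => PySem.Str.isIn g qname) with
    | true =>
      simp only [hadm, hany, Bool.not_true, if_true, if_false, Bool.false_eq_true]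
      exact rights_eq_scan qname
    | false =>
      simp only [hadm, hany, Bool.not_false, if_true, if_false, Bool.false_eq_true]
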